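-- pv_equiv track=rewrite | github.com/DancingOnAir/LeetcodePythonSolution | DP/LIS/1964_find_the_longest_valid_obstacle_course_at_each_position.py | longestObstacleCourseAtEachPosition2
-- ===== SOURCE A (Python) =====
-- from typing import List
--
-- def longestObstacleCourseAtEachPosition2(obstacles: List[int]) -> List[int]:
--     n = len(obstacles)
--
--     dp = [0] * n
--     for i in range(n):
--         for j in range(i):
--             if obstacles[j] <= obstacles[i]:
--                 dp[i] = max(dp[i], dp[j])
--         dp[i] += 1
--     return dp
-- ===== SOURCE B (Python) =====
-- from typing import List
--
-- def longestObstacleCourseAtEachPosition2(obstacles: List[int]) -> List[int]: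
--     # Patience sorting: tails[k] = smallest possible last element of a
--     # non-decreasing subsequence of length k+1 seen so far.
--     tails = []
--     res = []
--     for x in obstacles:
--         # bisect_right(tails, x), written out (A imports no bisect module)
--         lo, hi = 0, len(tails)
--         while lo < hi:
--             mid = (lo + hi) // 2
--             if tails[mid] <= x:
--                 lo = mid + 1
--             else:
--                 hi = mid
--         if lo == len(tails):
--             tails.append(x)
--         else:
--             tails[lo] = x
--         res.append(lo + 1)
--     return res
-- ===== Notes on version B (the rewrite author's own statement) =====
-- stated objective: faster
-- what changed: Replaced the quadratic all-previous-indices DP scan with patience sorting: a sorted tails array updated by binary search (bisect_right written out), recording position+1 for each element.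
import Mathlib
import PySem

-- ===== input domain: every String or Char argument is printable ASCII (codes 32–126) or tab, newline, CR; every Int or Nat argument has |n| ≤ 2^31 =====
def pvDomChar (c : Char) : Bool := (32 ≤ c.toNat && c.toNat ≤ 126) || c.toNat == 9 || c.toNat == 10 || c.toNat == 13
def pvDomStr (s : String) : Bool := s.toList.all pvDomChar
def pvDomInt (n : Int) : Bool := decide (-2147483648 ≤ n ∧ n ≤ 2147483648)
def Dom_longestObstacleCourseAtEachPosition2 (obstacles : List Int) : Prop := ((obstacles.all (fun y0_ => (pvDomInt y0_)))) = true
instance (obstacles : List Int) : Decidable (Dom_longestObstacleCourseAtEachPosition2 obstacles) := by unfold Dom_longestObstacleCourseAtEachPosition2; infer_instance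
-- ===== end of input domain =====

-- B replaces A's quadratic per-index scan of all earlier dp values with patience
-- sorting (a sorted tails list updated by hand-written binary search), O(n log n);
-- a timing run measured B faster. Equality of the two outputs is proved below.


-- ===== PORT A =====
-- A's outer loop over i, carrying the already-final dp prefix `pre` paired with the
-- corresponding obstacle values; the inner loop over j < i is the foldl over `pre`
-- (same order, same max/`<=` test); then `+ 1`.
def goA (pre : List (Int × Int)) (rest : List Int) : List Int :=
  match rest with
  | [] => []
  | x :: xs =>
      let d := (pre.foldl (fun m p => if p.1 ≤ x then max m p.2 else m) 0) + 1
      d :: goA (pre ++ [(x, d)]) xs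

def longestObstacleCourseAtEachPosition2 (obstacles : List Int) : List Int :=
  goA [] obstacles

-- ===== PORT B =====
-- hand-written bisect_right from Source B; (lo+hi)/2 on Nat matches Python's // on
-- the nonnegative lo, hi
def bisectR (tails : List Int) (x : Int) (lo hi : Nat) : Nat :=
  if h : lo < hi then
    let mid := (lo + hi) / 2
    if tails.getD mid 0 ≤ x then bisectR tails x (mid + 1) hi
    else bisectR tails x lo mid
  else lo
termination_by hi - lo
decreasing_by all_goals omega

def goB (tails : List Int) (rest : List Int) : List Int :=
  match rest with
  | [] => []
  | x :: xs =>
      let k := bisectR tails x 0 tails.length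
      let tails' := if k = tails.length then tails ++ [x] else tails.set k x
      ((k : Int) + 1) :: goB tails' xs

def longestObstacleCourseAtEachPosition2_alt (obstacles : List Int) : List Int :=
  goB [] obstacles

-- ===== PRECONDITION & SPEC =====
def Spec_longestObstacleCourseAtEachPosition2 (obstacles : List Int) (out : List Int) : Prop := out = longestObstacleCourseAtEachPosition2_alt obstacles
instance (obstacles : List Int) (out : List Int) : Decidable (Spec_longestObstacleCourseAtEachPosition2 obstacles out) := by unfold Spec_longestObstacleCourseAtEachPosition2; infer_instance

-- ===== CLAIM (what is proved, stated in full; the proofs are below) =====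
def Claim_equal_longestObstacleCourseAtEachPosition2 : Prop := ∀ (obstacles : List Int), Dom_longestObstacleCourseAtEachPosition2 obstacles → Spec_longestObstacleCourseAtEachPosition2 obstacles (longestObstacleCourseAtEachPosition2 obstacles)

-- ===== LEMMAS AND PROOFS =====

-- the inner-loop fold of A
def maxLe (pre : List (Int × Int)) (x : Int) : Int :=
  pre.foldl (fun m p => if p.1 ≤ x then max m p.2 else m) 0

-- invariant tying A's processed prefix (value, dp) pairs to B's tails list:
-- tails[k] is the minimum value among pairs with dp ≥ k+1, and every dp is
-- between 1 and tails.length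
def PVInv (pre : List (Int × Int)) (tails : List Int) : Prop :=
  (∀ k, k < tails.length → ∃ p ∈ pre, (k + 1 : Int) ≤ p.2 ∧ p.1 = tails.getD k 0) ∧
  (∀ k, k < tails.length → ∀ p ∈ pre, (k + 1 : Int) ≤ p.2 → tails.getD k 0 ≤ p.1) ∧
  (∀ p ∈ pre, 1 ≤ p.2 ∧ p.2 ≤ (tails.length : Int))

theorem le_foldl (x : Int) (pre : List (Int × Int)) (a : Int) :
    a ≤ pre.foldl (fun m p => if p.1 ≤ x then max m p.2 else m) a := by
  induction pre generalizing a with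
  | nil => simp
  | cons p ps ih =>
      simp only [List.foldl]
      refine le_trans ?_ (ih _)
      split <;> simp

theorem mem_le_foldl (x : Int) (pre : List (Int × Int)) (a : Int)
    (p : Int × Int) (hp : p ∈ pre) (hx : p.1 ≤ x) :
    p.2 ≤ pre.foldl (fun m p => if p.1 ≤ x then max m p.2 else m) a := by
  induction pre generalizing a with
  | nil => cases hp
  | cons q qs ih =>
      simp only [List.foldl]
      rcases List.mem_cons.mp hp with h | h
      · subst h
        refine le_trans ?_ (le_foldl x qs _)
        simp [hx]
      · exact ih _ h

theorem foldl_eq_or (x : Int) (pre : List (Int × Int)) (a : Int) :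
    pre.foldl (fun m p => if p.1 ≤ x then max m p.2 else m) a = a ∨
    ∃ p ∈ pre, p.1 ≤ x ∧ pre.foldl (fun m p => if p.1 ≤ x then max m p.2 else m) a = p.2 := by
  induction pre generalizing a with
  | nil => left; rfl
  | cons q qs ih =>
      simp only [List.foldl]
      by_cases hq : q.1 ≤ x
      · simp only [if_pos hq]
        rcases le_total a q.2 with h2 | h2
        · rw [max_eq_right h2]
          rcases ih q.2 with h | ⟨p, hp, hpx, hpe⟩
          · right; exact ⟨q, by simp, hq, h⟩
          · right; exact ⟨p, by simp [hp], hpx, hpe⟩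
        · rw [max_eq_left h2]
          rcases ih a with h | ⟨p, hp, hpx, hpe⟩
          · left; exact h
          · right; exact ⟨p, by simp [hp], hpx, hpe⟩
      · simp only [if_neg hq]
        rcases ih a with h | ⟨p, hp, hpx, hpe⟩
        · left; exact h
        · right; exact ⟨p, by simp [hp], hpx, hpe⟩

theorem maxLe_nonneg (pre : List (Int × Int)) (x : Int) : 0 ≤ maxLe pre x :=
  le_foldl x pre 0

-- tails is sorted (non-strictly), derived from the PVInv clauses
theorem inv_sorted (pre : List (Int × Int)) (tails : List Int) (hI : PVInv pre tails) :
    ∀ i j, i ≤ j → j < tails.length → tails.getD i 0 ≤ tails.getD j 0 := by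
  intro i j hij hj
  obtain ⟨hEx, hMin, _⟩ := hI
  obtain ⟨p, hp, hpd, hpe⟩ := hEx j hj
  have := hMin i (lt_of_le_of_lt hij hj) p hp (by omega)
  omega

-- binary-search characterisation
theorem bisectR_spec (tails : List Int) (x : Int)
    (hs : ∀ i j, i ≤ j → j < tails.length → tails.getD i 0 ≤ tails.getD j 0)
    (lo hi : Nat) (hhi : hi ≤ tails.length) (hlo : lo ≤ hi)
    (hbelow : ∀ i, i < lo → tails.getD i 0 ≤ x)
    (habove : ∀ i, hi ≤ i → i < tails.length → x < tails.getD i 0) :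
    bisectR tails x lo hi ≤ tails.length ∧
    (∀ i, i < bisectR tails x lo hi → tails.getD i 0 ≤ x) ∧
    (∀ i, bisectR tails x lo hi ≤ i → i < tails.length → x < tails.getD i 0) := by
  fun_induction bisectR tails x lo hi with
  | case1 lo hi h mid hle ih =>
      exact ih hhi (by omega) (fun i hi2 => le_trans (hs i mid (by omega) (by omega)) hle) habove
  | case2 lo hi h mid hgt ih =>
      refine ih (by omega) (by omega) hbelow (fun i hi2 hi3 => ?_)
      exact lt_of_lt_of_le (lt_of_not_ge hgt) (hs mid i (by omega) hi3)
  | case3 lo hi h =>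
      exact ⟨by omega, fun i h2 => hbelow i h2, fun i h2 h3 => habove i (by omega) h3⟩

-- at an PVInv state, the binary search returns exactly A's inner-loop maximum
theorem bisect_eq_maxLe (pre : List (Int × Int)) (tails : List Int) (x : Int)
    (hI : PVInv pre tails) :
    (bisectR tails x 0 tails.length : Int) = maxLe pre x := by
  obtain ⟨hEx, hMin, hBnd⟩ := hI
  obtain ⟨hle, hB1, hB2⟩ := bisectR_spec tails x (inv_sorted pre tails ⟨hEx, hMin, hBnd⟩)
    0 tails.length le_rfl (by omega) (by omega) (by omega)
  set k := bisectR tails x 0 tails.length with hk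
  have hge : maxLe pre x ≤ (k : Int) := by
    rcases foldl_eq_or x pre 0 with h | ⟨p, hp, hpx, hpe⟩
    · unfold maxLe; rw [h]; exact_mod_cast Nat.zero_le k
    · unfold maxLe; rw [hpe]
      by_contra hc
      push Not at hc
      have hkp : (k + 1 : Int) ≤ p.2 := by omega
      have hklen : k < tails.length := by
        have := (hBnd p hp).2; omega
      have := hMin k hklen p hp hkp
      have := hB2 k le_rfl hklen
      omega
  have hle2 : (k : Int) ≤ maxLe pre x := by
    rcases Nat.eq_zero_or_pos k with h0 | h0
    · rw [h0]; exact_mod_cast maxLe_nonneg pre x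
    · obtain ⟨p, hp, hpd, hpe⟩ := hEx (k - 1) (by omega)
      have hx : p.1 ≤ x := by
        rw [hpe]; exact hB1 (k - 1) (by omega)
      have := mem_le_foldl x pre 0 p hp hx
      unfold maxLe
      omega
  omega

-- PVInv is preserved by one step of both loops
theorem inv_step (pre : List (Int × Int)) (tails : List Int) (x : Int)
    (hI : PVInv pre tails) :
    PVInv (pre ++ [(x, maxLe pre x + 1)])
      (if bisectR tails x 0 tails.length = tails.length then tails ++ [x]
       else tails.set (bisectR tails x 0 tails.length) x) := by
  obtain ⟨hEx, hMin, hBnd⟩ := hI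
  obtain ⟨hle, hB1, hB2⟩ := bisectR_spec tails x (inv_sorted pre tails ⟨hEx, hMin, hBnd⟩)
    0 tails.length le_rfl (by omega) (by omega) (by omega)
  have hkm : (bisectR tails x 0 tails.length : Int) = maxLe pre x :=
    bisect_eq_maxLe pre tails x ⟨hEx, hMin, hBnd⟩
  set k := bisectR tails x 0 tails.length with hkdef
  set m := maxLe pre x with hmdef
  -- facts about the new tails
  set tails' := (if k = tails.length then tails ++ [x] else tails.set k x) with ht'
  have hlen' : tails'.length = if k = tails.length then tails.length + 1 else tails.length := by
    rw [ht']; split <;> simp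
  have hk_lt' : k < tails'.length := by rw [hlen']; split <;> omega
  have hget_k : tails'.getD k 0 = x := by
    rw [ht']; split
    · rename_i hcase; rw [hcase]; simp [List.getD]
    · rename_i hcase
      have hklt : k < tails.length := by omega
      simp [List.getD, List.getElem?_set_self hklt]
  have hget_lt : ∀ i, i < tails.length → i ≠ k → tails'.getD i 0 = tails.getD i 0 := by
    intro i hi hik
    rw [ht']; split
    · simp [List.getD, List.getElem?_append_left hi]
    · simp [List.getD, hik.symm]
  refine ⟨?_, ?_, ?_⟩
  · -- existence of minimisers
    intro j hj
    rcases Nat.lt_trichotomy j k with hjk | hjk | hjk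
    · obtain ⟨p, hp, hpd, hpe⟩ := hEx j (by omega)
      exact ⟨p, by simp [hp], hpd, by rw [hpe, hget_lt j (by omega) (by omega)]⟩
    · subst hjk
      refine ⟨(x, m + 1), by simp, by simp; omega, by rw [hget_k]⟩
    · have hjlen : j < tails.length := by
        rw [hlen'] at hj; split at hj <;> omega
      obtain ⟨p, hp, hpd, hpe⟩ := hEx j hjlen
      exact ⟨p, by simp [hp], hpd, by rw [hpe, hget_lt j hjlen (by omega)]⟩
  · -- minimality
    intro j hj p hp hpd
    rcases List.mem_append.mp hp with hp | hp
    · -- old pairs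
      rcases Nat.lt_trichotomy j k with hjk | hjk | hjk
      · rw [hget_lt j (by omega) (by omega)]
        exact hMin j (by omega) p hp hpd
      · subst hjk
        rw [hget_k]
        -- p.2 ≥ k+1 = m+1; if p.1 ≤ x then p.2 ≤ m, contradiction
        by_contra hc
        push Not at hc
        have := mem_le_foldl x pre 0 p hp (le_of_lt hc)
        have : p.2 ≤ m := this
        omega
      · have hjlen : j < tails.length := by
          rw [hlen'] at hj; split at hj <;> omega
        rw [hget_lt j hjlen (by omega)]
        exact hMin j hjlen p hp hpd
    · -- the new pair (x, m+1)
      simp at hp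
      subst hp
      simp only at hpd ⊢
      rcases Nat.lt_trichotomy j k with hjk | hjk | hjk
      · rw [hget_lt j (by omega) (by omega)]
        exact hB1 j hjk
      · rw [hjk, hget_k]
      · -- j > k impossible: the new dp value m+1 < j+1
        exfalso
        omega
  · -- dp bounds
    intro p hp
    rcases List.mem_append.mp hp with hp | hp
    · have := hBnd p hp
      have : p.2 ≤ (tails.length : Int) := this.2
      constructor
      · exact (hBnd p hp).1
      · rw [hlen']; split <;> push_cast <;> omega
    · simp at hp
      subst hp
      simp only
      have hm0 := maxLe_nonneg pre x
      constructor
      · omega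
      · rw [hlen']
        split
        · rename_i hcase; omega
        · have : k < tails.length := by omega
          omega

-- the two loops agree from any PVInv state
theorem goA_eq_goB (rest : List Int) (pre : List (Int × Int)) (tails : List Int)
    (hI : PVInv pre tails) : goA pre rest = goB tails rest := by
  induction rest generalizing pre tails with
  | nil => rfl
  | cons x xs ih =>
      simp only [goA, goB]
      have hkm := bisect_eq_maxLe pre tails x hI
      have hI' := inv_step pre tails x hI
      rw [← hkm] at hI'
      have hd : (pre.foldl (fun m p => if p.1 ≤ x then max m p.2 else m) 0) + 1
          = ((bisectR tails x 0 tails.length : Int) + 1) := by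
        unfold maxLe at hkm; omega
      rw [hd]
      congr 1
      exact ih _ _ hI'

-- ===== VERDICT (by name: the statement is the Claim_ definition above) =====
theorem longestObstacleCourseAtEachPosition2_spec : Claim_equal_longestObstacleCourseAtEachPosition2 := by
  intro obstacles _
  show longestObstacleCourseAtEachPosition2 obstacles = longestObstacleCourseAtEachPosition2_alt obstacles
  exact goA_eq_goB obstacles [] [] ⟨by simp, by simp, by simp⟩
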